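-- pv_equiv track=rewrite | github.com/lakhanrathor/SEIR_Assignment | simhash (1).py | simhash
-- ===== SOURCE A (Python) =====
-- def simhash(frequency_dic, hash_dic):
--     vector =[0]* 64
--     for word, freq in frequency_dic.items():
--         hash = hash_dic[word]
--         for i in range(64):
--             bit =(hash >>i)&1
--             if bit == 1:
--                 vector[i]+= freq
--             else:
--                 vector[i] -= freq
--     final_hash =0
--     for i in range(64):
--         if vector[i]>0:
--             final_hash |= (1<<i)
--     return final_hash
-- ===== SOURCE B (Python) =====
-- def simhash(frequency_dic, hash_dic):
--     # Aggregate frequencies per distinct 64-bit hash value, then decide each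
--     # output bit column-wise over the (usually far fewer) distinct hashes.
--     weight = {}
--     for word, freq in frequency_dic.items():
--         h = hash_dic[word]
--         weight[h] = weight.get(h, 0) + freq
--     out = 0
--     for i in range(64):
--         w = 0
--         for h, f in weight.items():
--             w += f if (h >> i) & 1 else -f
--         if w > 0:
--             out += 1 << i
--     return out
-- ===== Notes on version B (the rewrite author's own statement) =====
-- stated objective: alternative
-- what changed: B first groups frequencies into a hash-value->summed-frequency dict (words with equal hashes merge), then computes the simhash column-wise: for each bit it sums signed contributions over the distinct hashes only and adds 1<<i when positive, instead of A's row-wise pass maintaining a mutable 64-entry signed vector per word.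
import Mathlib
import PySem

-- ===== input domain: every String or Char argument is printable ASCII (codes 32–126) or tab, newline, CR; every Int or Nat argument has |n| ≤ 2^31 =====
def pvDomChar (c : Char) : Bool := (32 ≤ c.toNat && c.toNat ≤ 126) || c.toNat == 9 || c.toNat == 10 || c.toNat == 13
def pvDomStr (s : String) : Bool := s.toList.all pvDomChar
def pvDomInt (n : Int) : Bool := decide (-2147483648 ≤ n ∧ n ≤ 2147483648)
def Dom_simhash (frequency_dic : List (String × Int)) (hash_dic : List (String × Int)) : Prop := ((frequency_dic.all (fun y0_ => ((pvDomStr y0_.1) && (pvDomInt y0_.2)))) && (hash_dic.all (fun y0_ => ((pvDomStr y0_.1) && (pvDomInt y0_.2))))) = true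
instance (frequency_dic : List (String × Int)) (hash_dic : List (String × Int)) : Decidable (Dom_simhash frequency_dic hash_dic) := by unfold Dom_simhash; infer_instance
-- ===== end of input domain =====

-- B groups frequencies per distinct hash value in a dict and then decides each output bit
-- column-wise over the distinct hashes, instead of A's row-wise mutable 64-vector; alternative decomposition.

-- ===== PORT A =====
-- hash_dic[word]: dict lookup, first match; Pre_ guarantees the key is present (KeyError excluded),
-- so the .getD 0 default is never reached on admitted inputs.
-- (hash >> i) & 1 is ported as PySem.Int.band (hsh >>> i) 1 (Python-exact, also on negatives);
-- final_hash |= (1 << i) as PySem.Int.bor fh ((1:Int) <<< i).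
def pvStepA (hash_dic : List (String × Int)) (vec : List Int) (wf : String × Int) : List Int :=
  let hsh := ((PySem.Dict.mk hash_dic).get? wf.1).getD 0
  (List.range 64).map (fun (i : Nat) =>
    if PySem.Int.band (hsh >>> i) 1 = 1 then vec[i]! + wf.2 else vec[i]! - wf.2)

def simhash (frequency_dic : List (String × Int)) (hash_dic : List (String × Int)) : Int :=
  let vector := frequency_dic.foldl (pvStepA hash_dic) (List.replicate 64 (0:Int))
  (List.range 64).foldl
    (fun fh (i : Nat) => if vector[i]! > 0 then PySem.Int.bor fh ((1:Int) <<< i) else fh) 0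

-- ===== PORT B =====
-- weight[h] = weight.get(h, 0) + freq  →  Dict.insert h (Dict.getD h 0 + freq)
def pvGroupB (hash_dic : List (String × Int)) (d : PySem.Dict Int Int) (wf : String × Int) : PySem.Dict Int Int :=
  let hv := ((PySem.Dict.mk hash_dic).get? wf.1).getD 0
  d.insert hv (d.getD hv 0 + wf.2)

def simhash_alt (frequency_dic : List (String × Int)) (hash_dic : List (String × Int)) : Int :=
  let weight := frequency_dic.foldl (pvGroupB hash_dic) PySem.Dict.empty
  (List.range 64).foldl
    (fun out (i : Nat) =>
      let w := weight.items.foldl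
        (fun (s : Int) (q : Int × Int) => s + (if PySem.Int.band (q.1 >>> i) 1 = 1 then q.2 else -q.2)) 0
      if w > 0 then out + ((1:Int) <<< i) else out) 0

-- ===== PRECONDITION & SPEC =====
-- Pre_ excludes exactly the inputs where A raises KeyError: a word of frequency_dic absent from hash_dic.
def Pre_simhash (frequency_dic : List (String × Int)) (hash_dic : List (String × Int)) : Prop :=
  ∀ p ∈ frequency_dic, p.1 ∈ hash_dic.map Prod.fst
instance (frequency_dic : List (String × Int)) (hash_dic : List (String × Int)) : Decidable (Pre_simhash frequency_dic hash_dic) := by unfold Pre_simhash; infer_instance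
def pvWitness_simhash : (List (String × Int)) × (List (String × Int)) := ([("a", 2), ("b", -1)], [("a", 13), ("b", 6)])

def Spec_simhash (frequency_dic : List (String × Int)) (hash_dic : List (String × Int)) (out : Int) : Prop := out = simhash_alt frequency_dic hash_dic
instance (frequency_dic : List (String × Int)) (hash_dic : List (String × Int)) (out : Int) : Decidable (Spec_simhash frequency_dic hash_dic out) := by unfold Spec_simhash; infer_instance

-- ===== CLAIM (what is proved, stated in full; the proofs are below) =====
def Claim_equal_simhash : Prop := ∀ (frequency_dic : List (String × Int)) (hash_dic : List (String × Int)), Dom_simhash frequency_dic hash_dic → Pre_simhash frequency_dic hash_dic → Spec_simhash frequency_dic hash_dic (simhash frequency_dic hash_dic)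

-- ===== LEMMAS AND PROOFS =====

-- the signed contribution of a (hash, freq) pair to bit i
def pvContrib (i : Nat) (h f : Int) : Int :=
  if PySem.Int.band (h >>> i) 1 = 1 then f else -f

theorem pvContrib_add (i : Nat) (h a b : Int) :
    pvContrib i h (a + b) = pvContrib i h a + pvContrib i h b := by
  unfold pvContrib; split_ifs <;> ring

theorem pv_map_range_getElem! (g : Nat → Int) (i : Nat) (h : i < 64) :
    ((List.range 64).map g)[i]! = g i := by
  rw [getElem!_pos ((List.range 64).map g) i (by simpa)]
  simp

-- A-side: after the word loop, entry i of the vector is the signed sum of contributions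
theorem pv_A (hd : List (String × Int)) :
    ∀ (f : List (String × Int)) (va : List Int), va.length = 64 → ∀ i, i < 64 →
      (f.foldl (pvStepA hd) va)[i]! =
        va[i]! + (f.map (fun p => pvContrib i (((PySem.Dict.mk hd).get? p.1).getD 0) p.2)).sum := by
  intro f
  induction f with
  | nil => intro va _ i hi; simp
  | cons wf rest ih =>
    intro va hlen i hi
    simp only [List.foldl_cons, List.map_cons, List.sum_cons]
    rw [ih (pvStepA hd va wf) (by simp [pvStepA]) i hi]
    unfold pvStepA
    rw [pv_map_range_getElem! _ i hi]
    unfold pvContrib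
    split_ifs <;> ring

-- B-side, one insert: the signed sum over the dict's items grows by the new pair's contribution
theorem pv_subst_sum (g : Int × Int → Int) (k v0 v : Int) :
    ∀ (l : List (Int × Int)), (l.map Prod.fst).Nodup → (k, v0) ∈ l →
      ((l.map (fun p => if p.1 == k then (k, v) else p)).map g).sum
        = (l.map g).sum - g (k, v0) + g (k, v) := by
  intro l
  induction l with
  | nil => intro _ hm; cases hm
  | cons p rest ih =>
    intro hnd hm
    simp only [List.map_cons, List.nodup_cons] at hnd ⊢
    rcases List.mem_cons.mp hm with hm | hm
    · subst hm
      simp only [beq_self_eq_true, if_pos, List.sum_cons]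
      have hrest : rest.map (fun p => if p.1 == k then (k, v) else p) = rest.map id := by
        apply List.map_congr_left
        intro q hq
        have : q.1 ≠ k := by
          intro hqk
          have hmem : q.1 ∈ rest.map Prod.fst := List.mem_map_of_mem (f := Prod.fst) hq
          rw [hqk] at hmem
          exact hnd.1 hmem
        simp [this]
      rw [hrest, List.map_id]; ring
    · have hpk : p.1 ≠ k := by
        intro h
        exact hnd.1 (h ▸ List.mem_map_of_mem hm)
      simp only [List.sum_cons]
      rw [if_neg (by simp [hpk]), ih hnd.2 hm]; ring

theorem pv_insert_sum (i : Nat) (d : PySem.Dict Int Int) (k f : Int) (hnd : d.keys.Nodup) :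
    ((d.insert k (d.getD k 0 + f)).items.map (fun q => pvContrib i q.1 q.2)).sum
      = (d.items.map (fun q => pvContrib i q.1 q.2)).sum + pvContrib i k f := by
  by_cases hc : d.contains k = true
  · have hsome : ∃ v0, d.get? k = some v0 := by
      rw [PySem.Dict.contains_eq_isSome_get?] at hc
      exact Option.isSome_iff_exists.mp hc
    obtain ⟨v0, hv0⟩ := hsome
    have hmem : (k, v0) ∈ d.items := PySem.Dict.mem_items_of_get?_eq_some d hv0
    have hgd : d.getD k 0 = v0 := PySem.Dict.getD_of_get?_eq_some d 0 hv0
    rw [PySem.Dict.items_insert_of_contains d _ hc,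
      pv_subst_sum _ k v0 _ d.items hnd hmem, hgd, pvContrib_add]
    ring
  · rw [PySem.Dict.items_insert_of_not_contains d _ (by simpa using hc),
      PySem.Dict.getD_of_not_contains d 0 (by simpa using hc)]
    simp

-- B-side, whole grouping loop
theorem pv_B (hd : List (String × Int)) (i : Nat) :
    ∀ (f : List (String × Int)) (d : PySem.Dict Int Int), d.keys.Nodup →
      ((f.foldl (pvGroupB hd) d).items.map (fun q => pvContrib i q.1 q.2)).sum
        = (d.items.map (fun q => pvContrib i q.1 q.2)).sum
          + (f.map (fun p => pvContrib i (((PySem.Dict.mk hd).get? p.1).getD 0) p.2)).sum := by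
  intro f
  induction f with
  | nil => intro d _; simp
  | cons wf rest ih =>
    intro d hnd
    simp only [List.foldl_cons, List.map_cons, List.sum_cons]
    rw [ih (pvGroupB hd d wf) (PySem.Dict.nodup_keys_insert _ _ _ hnd)]
    unfold pvGroupB
    rw [pv_insert_sum i d _ _ hnd]
    ring

theorem pv_foldl_sum (g : Int × Int → Int) (l : List (Int × Int)) (s : Int) :
    l.foldl (fun s q => s + g q) s = s + (l.map g).sum := by
  induction l generalizing s with
  | nil => simp
  | cons q rest ih => simp only [List.foldl_cons, List.map_cons, List.sum_cons]; rw [ih]; ring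

theorem pv_nat_lor_two_pow : ∀ (n m : Nat), m < 2 ^ n → m ||| 2 ^ n = m + 2 ^ n := by
  intro n
  induction n with
  | zero => intro m h; interval_cases m; decide
  | succ n ih =>
    intro m h
    have hm : Nat.bit (decide (m % 2 = 1)) (m >>> 1) = m :=
      Nat.bit_decide_mod_two_eq_one_shiftRight_one m
    have h2 : (2:Nat) ^ (n+1) = Nat.bit false (2 ^ n) := by
      simp [Nat.bit, Nat.pow_succ, Nat.mul_comm]
    have hq : m >>> 1 < 2 ^ n := by
      simp only [Nat.shiftRight_one]
      omega
    calc m ||| 2 ^ (n+1) = Nat.bit (decide (m % 2 = 1)) (m >>> 1) ||| Nat.bit false (2 ^ n) := by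
          rw [hm, h2]
      _ = Nat.bit (decide (m % 2 = 1) || false) (m >>> 1 ||| 2 ^ n) := Nat.lor_bit _ _ _ _
      _ = Nat.bit (decide (m % 2 = 1)) (m >>> 1 + 2 ^ n) := by rw [Bool.or_false, ih _ hq]
      _ = m + 2 ^ (n+1) := by
          rw [Nat.bit_val]
          rw [Nat.bit_val] at hm
          simp only [Nat.shiftRight_one] at hm ⊢
          rw [Nat.pow_succ]
          omega

theorem pv_shiftLeft_one (n : Nat) : ((1:Int) <<< n) = ((2:Int) ^ n) := by
  rw [Int.shiftLeft_eq]; ring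

theorem pv_bor_two_pow (a : Int) (n : Nat) (h0 : 0 ≤ a) (h : a < 2 ^ n) :
    PySem.Int.bor a ((1:Int) <<< n) = a + 2 ^ n := by
  rw [pv_shiftLeft_one]
  obtain ⟨m, rfl⟩ := Int.eq_ofNat_of_zero_le h0
  have hm : m < 2 ^ n := by exact_mod_cast h
  have : ((2:Int) ^ n) = ((2 ^ n : Nat) : Int) := by push_cast; ring
  rw [this, PySem.Int.bor_natCast, pv_nat_lor_two_pow n m hm]
  push_cast; ring

-- both final loops over range n agree, and A's accumulator stays in [0, 2^n)
theorem pv_final (c d : Nat → Prop) [DecidablePred c] [DecidablePred d]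
    (hcd : ∀ i, i < 64 → (c i ↔ d i)) :
    ∀ n, n ≤ 64 →
      ((List.range n).foldl (fun fh (i : Nat) => if c i then PySem.Int.bor fh ((1:Int) <<< i) else fh) 0 =
        (List.range n).foldl (fun s (i : Nat) => if d i then s + ((1:Int) <<< i) else s) 0) ∧
      0 ≤ (List.range n).foldl (fun fh (i : Nat) => if c i then PySem.Int.bor fh ((1:Int) <<< i) else fh) 0 ∧
      (List.range n).foldl (fun fh (i : Nat) => if c i then PySem.Int.bor fh ((1:Int) <<< i) else fh) 0 < 2 ^ n := by
  intro n
  induction n with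
  | zero => intro _; refine ⟨rfl, le_refl _, by norm_num⟩
  | succ n ih =>
    intro hn
    obtain ⟨heq, h0, hlt⟩ := ih (by omega)
    rw [List.range_succ, List.foldl_append, List.foldl_append]
    simp only [List.foldl_cons, List.foldl_nil]
    set A := (List.range n).foldl (fun fh (i : Nat) => if c i then PySem.Int.bor fh ((1:Int) <<< i) else fh) 0 with hA
    have hpow : (2:Int) ^ n < 2 ^ (n+1) := by
      have : (2:Int) ^ (n+1) = 2 ^ n * 2 := pow_succ 2 n
      nlinarith [pow_pos (by norm_num : (0:Int) < 2) n]
    by_cases hc : c n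
    · rw [if_pos hc, if_pos ((hcd n (by omega)).mp hc), pv_bor_two_pow A n h0 hlt, ← heq,
        pv_shiftLeft_one]
      refine ⟨rfl, by positivity, ?_⟩
      have : (2:Int) ^ (n+1) = 2 ^ n * 2 := pow_succ 2 n
      omega
    · rw [if_neg hc, if_neg (fun hd' => hc ((hcd n (by omega)).mpr hd'))]
      exact ⟨heq, h0, lt_trans hlt hpow⟩

-- ===== VERDICT (by name: the statement is the Claim_ definition above) =====
theorem simhash_spec : Claim_equal_simhash := by
  intro f h _ _
  unfold Spec_simhash simhash simhash_alt
  have hA := pv_A h f (List.replicate 64 0) (by simp)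
  have hB := pv_B h
  have := pv_final
    (fun i => (f.foldl (pvStepA h) (List.replicate 64 0))[i]! > 0)
    (fun i => (f.foldl (pvGroupB h) PySem.Dict.empty).items.foldl
      (fun (s : Int) (q : Int × Int) => s + (if PySem.Int.band (q.1 >>> i) 1 = 1 then q.2 else -q.2)) 0 > 0)
    (by intro i hi
        dsimp only
        rw [hA i hi,
          pv_foldl_sum (fun q => if PySem.Int.band (q.1 >>> i) 1 = 1 then q.2 else -q.2)]
        have hfun : (fun q : Int × Int => if PySem.Int.band (q.1 >>> i) 1 = 1 then q.2 else -q.2)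
            = (fun q : Int × Int => pvContrib i q.1 q.2) := rfl
        rw [hfun, hB i f PySem.Dict.empty PySem.Dict.nodup_keys_empty]
        have hre : (List.replicate 64 (0:Int))[i]! = 0 := by
          rw [getElem!_pos (List.replicate 64 (0:Int)) i (by simpa)]
          exact List.getElem_replicate _
        rw [hre]
        simp [PySem.Dict.empty])
    64 (le_refl 64)
  exact this.1
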